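-- pv_equiv track=rewrite | github.com/wassimmho/python-offensive-tool | website/Signup/guessing.py | candidate_generator
-- ===== SOURCE A (Python) =====
-- import itertools
--
-- def candidate_generator(charset, min_len, max_len, resume_from=None):
--
--     #generates all possible passwords started is false at the start or start from a specific password
--     #joins passwords into a string then send them and wait for a response
--
--     started = resume_from is None
--     for L in range(min_len, max_len + 1):
--         # itertools.product returns tuples of characters; join to make strings
--         for tup in itertools.product(charset, repeat=L):
--             pwd = ''.join(tup)
--             if not started:
--                 if pwd == resume_from:
--                     started = True
--                     yield pwd
--                 else:
--                     continue
--             else: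
--                 yield pwd
-- ===== SOURCE B (Python) =====
-- def candidate_generator(charset, min_len, max_len, resume_from=None):
--     # Rank-based enumeration: decode each index to a string instead of walking
--     # itertools.product; the resume point is located by odometer rank, so
--     # candidates before it are never generated.
--     n = len(charset)
--
--     def decode(L, idx):
--         out = []
--         for _ in range(L):
--             idx, d = divmod(idx, n)
--             out.append(charset[d])
--         return ''.join(reversed(out))
--
--     start_len = min_len
--     start_rank = 0
--     if resume_from is not None:
--         L = len(resume_from)
--         if L < min_len or L > max_len or any(c not in charset for c in resume_from):
--             return
--         rank = 0
--         for c in resume_from: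
--             rank = rank * n + charset.index(c)
--         start_len, start_rank = L, rank
--     for L in range(start_len, max_len + 1):
--         for idx in range(start_rank, n ** L):
--             yield decode(L, idx)
--         start_rank = 0
-- ===== Notes on version B (the rewrite author's own statement) =====
-- stated objective: alternative
-- what changed: B replaces A's exhaustive itertools.product walk that compares every candidate against resume_from by rank arithmetic: it computes the resume point's odometer rank over the charset, starts the enumeration at that rank, and decodes each index to its string, so candidates before the resume point are never generated.
import Mathlib
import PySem

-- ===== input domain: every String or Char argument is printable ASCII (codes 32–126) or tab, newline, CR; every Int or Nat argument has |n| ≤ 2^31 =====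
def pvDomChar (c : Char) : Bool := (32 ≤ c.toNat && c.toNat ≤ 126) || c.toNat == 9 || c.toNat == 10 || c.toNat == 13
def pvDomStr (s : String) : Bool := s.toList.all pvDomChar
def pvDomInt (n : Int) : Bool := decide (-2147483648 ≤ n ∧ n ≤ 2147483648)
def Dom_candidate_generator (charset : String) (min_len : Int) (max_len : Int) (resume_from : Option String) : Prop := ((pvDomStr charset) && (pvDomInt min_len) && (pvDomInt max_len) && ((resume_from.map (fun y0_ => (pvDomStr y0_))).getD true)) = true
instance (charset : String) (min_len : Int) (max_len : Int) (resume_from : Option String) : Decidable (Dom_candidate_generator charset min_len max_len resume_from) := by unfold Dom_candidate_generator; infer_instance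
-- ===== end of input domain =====

-- B replaces A's scan-and-compare over every itertools.product tuple by rank arithmetic:
-- the resume point's odometer rank is computed directly and decoding starts there, so
-- candidates before the resume point are never generated (a different algorithm; the
-- output itself dominates the cost, so no overall speed-up is claimed).

-- ===== PORT A =====
-- itertools.product(charset, repeat=L): leftmost position varies slowest.
def pyProductA (cs : List Char) : Nat → List (List Char)
  | 0 => [[]]
  | L + 1 => cs.flatMap (fun c => (pyProductA cs L).map (fun t => c :: t))

-- body of A's inner 'for tup in itertools.product(...)' loop; state = (started, yielded so far)
def candGenStepA (resume_from : Option String) (st : Bool × List String) (tup : List Char) : Bool × List String :=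
  let pwd := String.ofList tup            -- ''.join(tup)
  if st.1 = false then
    if some pwd = resume_from then (true, st.2 ++ [pwd]) else st
  else (st.1, st.2 ++ [pwd])

def candidate_generator (charset : String) (min_len : Int) (max_len : Int) (resume_from : Option String) : List String :=
  let cs := charset.toList
  let started := resume_from.isNone
  -- 'for L in range(min_len, max_len + 1)'; Pre_ excludes negative L (Python raises ValueError),
  -- so 'L.toNat' is exact on the admitted inputs
  ((PySem.List.pyRange min_len (max_len + 1) 1).foldl
      (fun st L => (pyProductA cs L.toNat).foldl (candGenStepA resume_from) st)
      (started, [])).2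

-- ===== PORT B =====
-- B's decode(L, idx): repeatedly divmod by n collecting charset[d], then reverse and join
def candGenDecodeGo (cs : List Char) (n : Nat) : Nat → Nat → List Char → List Char
  | 0, _, out => out
  | k + 1, idx, out => candGenDecodeGo cs n k (idx / n) (out ++ [cs.getD (idx % n) ' '])

def candGenDecode (cs : List Char) (n : Nat) (L : Nat) (idx : Nat) : String :=
  String.ofList (candGenDecodeGo cs n L idx []).reverse

-- body of B's 'for L in range(start_len, max_len + 1)' loop; state = (start_rank, yielded so far);
-- Python's range(start_rank, n ** L) is range' start_rank (n ^ L - start_rank)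
def candGenStepB (cs : List Char) (n : Nat) (st : Nat × List String) (L : Int) : Nat × List String :=
  (0, st.2 ++ (List.range' st.1 (n ^ L.toNat - st.1)).map (candGenDecode cs n L.toNat))

def candidate_generator_alt (charset : String) (min_len : Int) (max_len : Int) (resume_from : Option String) : List String :=
  let cs := charset.toList
  let n := cs.length
  let start : Option (Int × Nat) :=      -- (start_len, start_rank); none = the early 'return'
    match resume_from with
    | none => some (min_len, 0)
    | some r =>
        let rl := r.toList
        if decide ((rl.length : Int) < min_len) || decide (max_len < (rl.length : Int))
            || rl.any (fun c => !cs.contains c) then none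
        else some ((rl.length : Int), rl.foldl (fun acc c => acc * n + cs.idxOf c) 0)
  match start with
  | none => []
  | some (start_len, start_rank) =>
      ((PySem.List.pyRange start_len (max_len + 1) 1).foldl (candGenStepB cs n) (start_rank, [])).2

-- ===== PRECONDITION & SPEC =====
-- Pre_ excludes only inputs where A raises: a negative L reaches itertools.product(repeat=L),
-- a ValueError (i.e. min_len < 0 with a nonempty range).
def Pre_candidate_generator (charset : String) (min_len : Int) (max_len : Int) (resume_from : Option String) : Prop :=
  0 ≤ min_len ∨ max_len < min_len

instance (charset : String) (min_len : Int) (max_len : Int) (resume_from : Option String) : Decidable (Pre_candidate_generator charset min_len max_len resume_from) := by unfold Pre_candidate_generator; infer_instance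

def pvWitness_candidate_generator : String × Int × Int × Option String := ("ab", 1, 2, some "b")

def Spec_candidate_generator (charset : String) (min_len : Int) (max_len : Int) (resume_from : Option String) (out : List String) : Prop := out = candidate_generator_alt charset min_len max_len resume_from
instance (charset : String) (min_len : Int) (max_len : Int) (resume_from : Option String) (out : List String) : Decidable (Spec_candidate_generator charset min_len max_len resume_from out) := by unfold Spec_candidate_generator; infer_instance

-- ===== CLAIM (what is proved, stated in full; the proofs are below) =====
def Claim_equal_candidate_generator : Prop := ∀ (charset : String) (min_len : Int) (max_len : Int) (resume_from : Option String), Dom_candidate_generator charset min_len max_len resume_from → Pre_candidate_generator charset min_len max_len resume_from → Spec_candidate_generator charset min_len max_len resume_from (candidate_generator charset min_len max_len resume_from)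

-- ===== LEMMAS AND PROOFS =====

-- digits of idx, least significant first, mapped through cs
def candGenDigits (cs : List Char) (n : Nat) : Nat → Nat → List Char
  | 0, _ => []
  | k + 1, idx => cs.getD (idx % n) ' ' :: candGenDigits cs n k (idx / n)

-- the decoded character list, most significant first
def candGenDec (cs : List Char) (n : Nat) (L : Nat) (idx : Nat) : List Char :=
  (candGenDigits cs n L idx).reverse

-- rank of a character list (the odometer value B computes)
def candGenRnk (cs : List Char) (n : Nat) (rl : List Char) : Nat :=
  rl.foldl (fun acc c => acc * n + cs.idxOf c) 0

theorem decodeGo_eq_digits (cs : List Char) (n : Nat) :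
    ∀ (k idx : Nat) (out : List Char),
      candGenDecodeGo cs n k idx out = out ++ candGenDigits cs n k idx := by
  intro k
  induction k with
  | zero => intro idx out; simp [candGenDecodeGo, candGenDigits]
  | succ k ih =>
      intro idx out
      simp [candGenDecodeGo, candGenDigits, ih]


theorem decode_eq_dec (cs : List Char) (n L idx : Nat) :
    candGenDecode cs n L idx = String.ofList (candGenDec cs n L idx) := by
  have := decodeGo_eq_digits cs n L idx []
  simp [candGenDecode, candGenDec, this]


theorem dec_succ (cs : List Char) (n L idx : Nat) :
    candGenDec cs n (L + 1) idx = candGenDec cs n L (idx / n) ++ [cs.getD (idx % n) ' '] := by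
  simp [candGenDec, candGenDigits]


theorem dec_length (cs : List Char) (n : Nat) : ∀ L idx, (candGenDec cs n L idx).length = L := by
  intro L
  induction L with
  | zero => intro idx; simp [candGenDec, candGenDigits]
  | succ L ih =>
      intro idx
      simp only [candGenDec, candGenDigits, List.reverse_cons, List.length_append,
        List.length_reverse, List.length_cons, List.length_nil]
      have := ih (idx / n)
      simp [candGenDec] at this
      omega


theorem rnk_append (cs : List Char) (n : Nat) (rl : List Char) (c : Char) :
    candGenRnk cs n (rl ++ [c]) = candGenRnk cs n rl * n + cs.idxOf c := by
  simp [candGenRnk, List.foldl_append]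


theorem rnk_lt (cs : List Char) (rl : List Char) (h : ∀ c ∈ rl, c ∈ cs) :
    candGenRnk cs cs.length rl < cs.length ^ rl.length := by
  induction rl using List.reverseRecOn with
  | nil => simp [candGenRnk]
  | append_singleton r c ih =>
      have hc : c ∈ cs := h c (by simp)
      have hn : cs.idxOf c < cs.length := List.idxOf_lt_length_of_mem hc
      have hr := ih (fun x hx => h x (by simp [hx]))
      rw [rnk_append]
      simp only [List.length_append, List.length_cons, List.length_nil, pow_succ]
      calc candGenRnk cs cs.length r * cs.length + cs.idxOf c
          < (candGenRnk cs cs.length r + 1) * cs.length := by nlinarith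
        _ ≤ cs.length ^ r.length * cs.length := by
            exact Nat.mul_le_mul_right _ (by omega)


theorem dec_rnk (cs : List Char) (rl : List Char) (h : ∀ c ∈ rl, c ∈ cs) :
    candGenDec cs cs.length rl.length (candGenRnk cs cs.length rl) = rl := by
  induction rl using List.reverseRecOn with
  | nil => simp [candGenRnk, candGenDec, candGenDigits]
  | append_singleton r c ih =>
      have hc : c ∈ cs := h c (by simp)
      have hn : cs.idxOf c < cs.length := List.idxOf_lt_length_of_mem hc
      have hpos : 0 < cs.length := by omega
      have hr := ih (fun x hx => h x (by simp [hx]))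
      rw [rnk_append]
      simp only [List.length_append, List.length_cons, List.length_nil]
      rw [dec_succ]
      have hdiv : (candGenRnk cs cs.length r * cs.length + cs.idxOf c) / cs.length
          = candGenRnk cs cs.length r := by
        rw [Nat.mul_comm, Nat.mul_add_div hpos]
        simp [Nat.div_eq_of_lt hn]
      have hmod : (candGenRnk cs cs.length r * cs.length + cs.idxOf c) % cs.length
          = cs.idxOf c := by
        rw [Nat.mul_comm, Nat.mul_add_mod]
        exact Nat.mod_eq_of_lt hn
      rw [hdiv, hmod, hr]
      simp [List.getElem?_eq_getElem hn, List.getElem_idxOf]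


theorem rnk_le_of_dec_eq (cs : List Char) (rl : List Char) (h : ∀ c ∈ rl, c ∈ cs) :
    ∀ idx, candGenDec cs cs.length rl.length idx = rl → candGenRnk cs cs.length rl ≤ idx := by
  induction rl using List.reverseRecOn with
  | nil => intro idx _; simp [candGenRnk]
  | append_singleton r c ih =>
      intro idx hd
      have hc : c ∈ cs := h c (by simp)
      have hn0 : 0 < cs.length := List.length_pos_of_mem hc
      simp only [List.length_append, List.length_cons, List.length_nil] at hd
      rw [dec_succ] at hd
      have hlen := dec_length cs cs.length r.length (idx / cs.length)
      have hinj := List.append_inj hd (by simp [hlen])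
      obtain ⟨h1, h2⟩ := hinj
      have hmodlt : idx % cs.length < cs.length := Nat.mod_lt _ hn0
      have hgetc : cs[idx % cs.length]'hmodlt = c := by
        have := List.getD_eq_getElem cs ' ' hmodlt
        simp [← this]
        simpa using h2
      have hidxle : cs.idxOf c ≤ idx % cs.length := by
        by_contra h1'
        have h2' : idx % cs.length < List.idxOf c cs := by omega
        have := List.not_of_lt_findIdx (p := (· == c)) (xs := cs) (i := idx % cs.length)
          (by simpa [List.idxOf] using h2')
        simp only [beq_eq_false_iff_ne, ne_eq] at this; exact this hgetc
      have hrle : candGenRnk cs cs.length r ≤ idx / cs.length :=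
        ih (fun x hx => h x (by simp [hx])) (idx / cs.length) h1
      rw [rnk_append]
      calc candGenRnk cs cs.length r * cs.length + cs.idxOf c
          ≤ (idx / cs.length) * cs.length + idx % cs.length := by
            exact Nat.add_le_add (Nat.mul_le_mul_right _ hrle) hidxle
        _ = idx := by
            rw [Nat.mul_comm]
            exact Nat.div_add_mod idx cs.length


theorem mem_pyProductA (cs : List Char) :
    ∀ L t, t ∈ pyProductA cs L → (∀ c ∈ t, c ∈ cs) ∧ t.length = L := by
  intro L
  induction L with
  | zero => intro t ht; simp [pyProductA] at ht; simp [ht]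
  | succ L ih =>
      intro t ht
      simp only [pyProductA, List.mem_flatMap, List.mem_map] at ht
      obtain ⟨c, hc, t', ht', rfl⟩ := ht
      obtain ⟨h1, h2⟩ := ih t' ht'
      refine ⟨?_, by simp [h2]⟩
      intro x hx
      rcases List.mem_cons.mp hx with rfl | hx
      · exact hc
      · exact h1 x hx


theorem pyProductA_snoc (cs : List Char) (L : Nat) :
    pyProductA cs (L + 1) = (pyProductA cs L).flatMap (fun t => cs.map (fun c => t ++ [c])) := by
  induction L with
  | zero =>
      simp only [pyProductA]
      induction cs with
      | nil => simp
      | cons c cs ih2 => simp_all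
  | succ L ih =>
      conv_lhs => rw [pyProductA, ih]
      rw [pyProductA]
      simp [List.flatMap_assoc, List.map_flatMap, List.flatMap_map, List.map_map,
        Function.comp_def]


theorem range_mul_flatMap (a n : Nat) :
    List.range (a * n) = (List.range a).flatMap (fun i => (List.range n).map (fun j => i * n + j)) := by
  induction a with
  | zero => simp
  | succ a ih =>
      rw [Nat.succ_mul, List.range_add, ih, List.range_succ, List.flatMap_append]
      simp [Nat.mul_comm]

theorem map_eq_range_map_getD (cs : List Char) (f : Char → List Char) :
    cs.map f = (List.range cs.length).map (fun j => f (cs.getD j ' ')) := by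
  apply List.ext_getElem
  · simp
  · intro i h1 h2
    simp at h1 h2 ⊢
    rw [List.getElem?_eq_getElem h2]
    simp

theorem pyProductA_eq_map_dec (cs : List Char) (L : Nat) :
    pyProductA cs L = (List.range (cs.length ^ L)).map (candGenDec cs cs.length L) := by
  induction L with
  | zero => simp [pyProductA, candGenDec, candGenDigits]
  | succ L ih =>
      rcases Nat.eq_zero_or_pos cs.length with h0 | hpos
      · have hnil : cs = [] := List.length_eq_zero_iff.mp h0
        subst hnil
        simp [pyProductA, h0, pow_succ]
      · rw [pyProductA_snoc, ih, pow_succ, range_mul_flatMap, List.flatMap_map,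
          List.map_flatMap]
        apply List.flatMap_congr
        intro i hi
        rw [map_eq_range_map_getD cs (fun c => candGenDec cs cs.length L i ++ [c]),
          List.map_map]
        apply List.map_congr_left
        intro j hj
        simp only [List.mem_range] at hj
        simp only [Function.comp_def]
        rw [dec_succ]
        congr 1
        · congr 1
          rw [Nat.mul_comm i, Nat.mul_add_div hpos, Nat.div_eq_of_lt hj]
          omega
        · congr 2
          rw [Nat.mul_comm i, Nat.mul_add_mod, Nat.mod_eq_of_lt hj]


theorem innerA_true (r? : Option String) :
    ∀ (ts : List (List Char)) (acc : List String),
      ts.foldl (candGenStepA r?) (true, acc) = (true, acc ++ ts.map String.ofList) := by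
  intro ts
  induction ts with
  | nil => intro acc; simp
  | cons t ts ih => intro acc; simp [candGenStepA, ih]

theorem innerA_false (r? : Option String) :
    ∀ (ts : List (List Char)), (∀ t ∈ ts, ¬ some (String.ofList t) = r?) →
      ∀ acc, ts.foldl (candGenStepA r?) (false, acc) = (false, acc) := by
  intro ts
  induction ts with
  | nil => intro _ acc; simp
  | cons t ts ih =>
      intro h acc
      have ht := h t (by simp)
      simp only [List.foldl_cons, candGenStepA]
      rw [if_neg ht]
      exact ih (fun x hx => h x (by simp [hx])) acc

theorem outerA_true (r? : Option String) (cs : List Char) :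
    ∀ (Ls : List Int) (acc : List String),
      Ls.foldl (fun st L => (pyProductA cs L.toNat).foldl (candGenStepA r?) st) (true, acc)
        = (true, acc ++ (Ls.map (fun L => (pyProductA cs L.toNat).map String.ofList)).flatten) := by
  intro Ls
  induction Ls with
  | nil => intro acc; simp
  | cons L Ls ih =>
      intro acc
      simp only [List.foldl_cons, innerA_true r?, ih, List.map_cons, List.flatten_cons,
        List.append_assoc]


theorem outerA_false (r? : Option String) (cs : List Char) :
    ∀ (Ls : List Int), (∀ L ∈ Ls, ∀ t ∈ pyProductA cs L.toNat, ¬ some (String.ofList t) = r?) →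
      ∀ acc,
        Ls.foldl (fun st L => (pyProductA cs L.toNat).foldl (candGenStepA r?) st) (false, acc)
          = (false, acc) := by
  intro Ls
  induction Ls with
  | nil => intro _ acc; simp
  | cons L Ls ih =>
      intro h acc
      simp only [List.foldl_cons]
      rw [innerA_false r? _ (h L (by simp)) acc]
      exact ih (fun x hx => h x (by simp [hx])) acc

theorem outerB (cs : List Char) (n : Nat) :
    ∀ (Ls : List Int) (acc : List String),
      (Ls.foldl (candGenStepB cs n) (0, acc)).2
        = acc ++ (Ls.map (fun L => (List.range (n ^ L.toNat)).map (candGenDecode cs n L.toNat))).flatten := by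
  intro Ls
  induction Ls with
  | nil => intro acc; simp
  | cons L Ls ih =>
      intro acc
      simp only [List.foldl_cons, candGenStepB, Nat.sub_zero, ih, List.map_cons,
        List.flatten_cons, List.append_assoc, ← List.range_eq_range']

theorem chunk_eq (cs : List Char) (L : Nat) :
    (pyProductA cs L).map String.ofList
      = (List.range (cs.length ^ L)).map (candGenDecode cs cs.length L) := by
  rw [pyProductA_eq_map_dec, List.map_map]
  apply List.map_congr_left
  intro i _
  simp [decode_eq_dec]

theorem range_split (a k : Nat) : List.range (a + k) = List.range a ++ List.range' a k := by
  rw [List.range_eq_range', List.range_eq_range']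
  have := List.range'_append (s := 0) (m := a) (n := k) (step := 1)
  simpa using this.symm

-- ===== VERDICT (by name: the statement is the Claim_ definition above) =====
theorem candidate_generator_spec : Claim_equal_candidate_generator := by
  intro charset min_len max_len resume_from _hdom hpre
  unfold Spec_candidate_generator
  cases resume_from with
  | none =>
      simp only [candidate_generator, candidate_generator_alt, Option.isNone_none]
      rw [outerA_true, outerB]
      simp only [List.nil_append]
      congr 1
      apply List.map_congr_left
      intro L _
      rw [chunk_eq]
  | some r =>
      simp only [candidate_generator, candidate_generator_alt, Option.isNone_some]
      by_cases hg : (decide ((r.toList.length : Int) < min_len)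
          || decide (max_len < (r.toList.length : Int))
          || r.toList.any (fun c => !charset.toList.contains c)) = true
      · rw [if_pos hg]
        rw [outerA_false]
        · intro L hL t ht heq
          obtain ⟨hall, hlen⟩ := mem_pyProductA charset.toList L.toNat t ht
          have htr : t = r.toList := by
            have h1 := Option.some.inj heq
            have := congrArg String.toList h1
            simpa using this
          subst htr
          have hmem := (PySem.List.mem_pyRange_one).mp hL
          have h0 : 0 ≤ min_len := by
            rcases hpre with h | h
            · exact h
            · omega
          have hLnat : ((L.toNat : Int)) = L := Int.toNat_of_nonneg (by omega)
          simp only [Bool.or_eq_true, decide_eq_true_eq] at hg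
          rcases hg with (hg | hg) | hany
          · omega
          · omega
          · simp only [List.any_eq_true] at hany
            obtain ⟨c0, hc0m, hc0n⟩ := hany
            have : c0 ∉ charset.toList := by simpa using hc0n
            exact this (hall c0 hc0m)
      · rw [if_neg hg]
        simp only [Bool.or_eq_true, decide_eq_true_eq, List.any_eq_true,
          Bool.not_eq_true', List.contains_eq_mem, decide_eq_false_iff_not, not_or,
          not_exists, not_lt] at hg
        obtain ⟨⟨h1, h2⟩, h3⟩ := hg
        have hall : ∀ c ∈ r.toList, c ∈ charset.toList := by
          intro c hc
          by_contra hcn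
          exact h3 c ⟨hc, hcn⟩
        have h0 : 0 ≤ min_len := by
          rcases hpre with h | h
          · exact h
          · omega
        have hrlt : candGenRnk charset.toList charset.toList.length r.toList
            < charset.toList.length ^ r.toList.length := rnk_lt charset.toList r.toList hall
        -- A side: split the lengths at r's length
        rw [PySem.List.pyRange_one_append min_len (r.toList.length : Int) (max_len + 1) h1
          (by omega), List.foldl_append]
        rw [outerA_false _ _ _ ?side1]
        case side1 =>
          intro L hL t ht heq
          obtain ⟨_, hlen⟩ := mem_pyProductA charset.toList L.toNat t ht
          have htr : t = r.toList := by
            have h1' := Option.some.inj heq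
            have := congrArg String.toList h1'
            simpa using this
          subst htr
          have hmem := (PySem.List.mem_pyRange_one).mp hL
          have hLnat : ((L.toNat : Int)) = L := Int.toNat_of_nonneg (by omega)
          omega
        rw [PySem.List.pyRange_one_cons (by omega)]
        simp only [List.foldl_cons, Int.toNat_natCast]
        rw [pyProductA_eq_map_dec]
        rw [show charset.toList.length ^ r.toList.length
              = candGenRnk charset.toList charset.toList.length r.toList
                + (charset.toList.length ^ r.toList.length
                   - candGenRnk charset.toList charset.toList.length r.toList) from by omega,
          range_split, List.map_append, List.foldl_append]
        rw [innerA_false _ _ ?side2]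
        case side2 =>
          intro t ht heq
          simp only [List.mem_map, List.mem_range] at ht
          obtain ⟨i, hi, rfl⟩ := ht
          have htr : candGenDec charset.toList charset.toList.length r.toList.length i
              = r.toList := by
            have h1' := Option.some.inj heq
            have := congrArg String.toList h1'
            simpa using this
          have := rnk_le_of_dec_eq charset.toList r.toList hall i htr
          omega
        rw [show charset.toList.length ^ r.toList.length
              - candGenRnk charset.toList charset.toList.length r.toList
              = (charset.toList.length ^ r.toList.length
                 - candGenRnk charset.toList charset.toList.length r.toList - 1) + 1 from by
            omega]
        rw [List.range'_succ]
        simp only [List.map_cons, List.foldl_cons]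
        have hdec : candGenDec charset.toList charset.toList.length r.toList.length
            (candGenRnk charset.toList charset.toList.length r.toList) = r.toList :=
          dec_rnk charset.toList r.toList hall
        simp only [candGenStepA, hdec, String.ofList_toList, if_true]
        rw [innerA_true, outerA_true]
        -- B side
        have hksplit : charset.toList.length ^ r.toList.length
              - candGenRnk charset.toList charset.toList.length r.toList
              = (charset.toList.length ^ r.toList.length
                 - candGenRnk charset.toList charset.toList.length r.toList - 1) + 1 := by
          omega
        conv_rhs =>
          rw [PySem.List.pyRange_one_cons (by omega), List.foldl_cons]
          simp only [candGenStepB, Int.toNat_natCast]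
          rw [outerB,
            show (List.foldl (fun acc c => acc * charset.toList.length + List.idxOf c charset.toList)
                0 r.toList) = candGenRnk charset.toList charset.toList.length r.toList from rfl,
            hksplit, List.range'_succ]
        simp only [List.map_cons, List.nil_append, List.map_map]
        rw [decode_eq_dec, hdec, String.ofList_toList]
        have hseg : List.map
            (String.ofList ∘ candGenDec charset.toList charset.toList.length r.toList.length)
            (List.range' (candGenRnk charset.toList charset.toList.length r.toList + 1)
              (charset.toList.length ^ r.toList.length
                - candGenRnk charset.toList charset.toList.length r.toList - 1))
            = List.map (candGenDecode charset.toList charset.toList.length r.toList.length)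
              (List.range' (candGenRnk charset.toList charset.toList.length r.toList + 1)
                (charset.toList.length ^ r.toList.length
                  - candGenRnk charset.toList charset.toList.length r.toList - 1)) := by
          apply List.map_congr_left
          intro i _
          simp [decode_eq_dec]
        have htails : (List.map (fun L => List.map String.ofList (pyProductA charset.toList L.toNat))
              (PySem.List.pyRange (↑r.toList.length + 1) (max_len + 1))).flatten
            = (List.map (fun L => List.map (candGenDecode charset.toList charset.toList.length L.toNat)
                (List.range (charset.toList.length ^ L.toNat)))
              (PySem.List.pyRange (↑r.toList.length + 1) (max_len + 1))).flatten := by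
          congr 1
          apply List.map_congr_left
          intro L _
          rw [chunk_eq]
        simp only [List.nil_append, List.cons_append]
        rw [hseg, htails]
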